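-- pv_equiv track=rewrite | github.com/justwzhang/Linear-and-Logistic-Regression | CSE353Hw4Main.py | groupXPLA
-- ===== SOURCE A (Python) =====
-- def groupXPLA(list, stride, pointSize):
--     returnedX = []
--     for i in range(stride):
--         tempXPoint = []
--         for j in range(pointSize):
--             tempXPoint.append(list[i + j*stride])
--         returnedX.append(tempXPoint)
--     return returnedX
-- ===== SOURCE B (Python) =====
-- def groupXPLA(list, stride, pointSize):
--     returnedX = [[] for _ in range(stride)]
--     for k in range(len(returnedX) * pointSize):
--         returnedX[k % stride].append(list[k])
--     return returnedX
-- ===== Notes on version B (the rewrite author's own statement) =====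
-- stated objective: alternative
-- what changed: Replaces the nested strided gather (for each group i, inner loop collecting list[i+j*stride]) by pre-building the stride buckets and one flat pass over range(len(buckets)*pointSize) that distributes list[k] into bucket k % stride.
import Mathlib
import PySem

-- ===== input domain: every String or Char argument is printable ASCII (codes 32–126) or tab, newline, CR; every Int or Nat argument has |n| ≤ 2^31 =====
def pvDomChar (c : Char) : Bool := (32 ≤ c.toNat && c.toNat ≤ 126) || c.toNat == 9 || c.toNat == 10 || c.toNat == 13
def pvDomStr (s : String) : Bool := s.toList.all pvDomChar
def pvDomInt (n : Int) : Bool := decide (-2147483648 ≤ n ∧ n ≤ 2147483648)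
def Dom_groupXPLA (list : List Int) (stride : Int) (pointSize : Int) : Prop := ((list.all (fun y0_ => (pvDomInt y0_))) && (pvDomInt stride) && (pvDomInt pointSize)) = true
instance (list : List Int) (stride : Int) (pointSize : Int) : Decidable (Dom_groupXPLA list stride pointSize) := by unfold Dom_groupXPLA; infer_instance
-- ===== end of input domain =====

-- B replaces A's nested strided gather by one flat pass distributing list[k] into bucket k % stride (alternative decomposition, same cost).

-- ===== PORT A =====
def groupXPLA (list : List Int) (stride : Int) (pointSize : Int) : List (List Int) :=
  (PySem.List.pyRange 0 stride 1).foldl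
    (fun returnedX i =>
      returnedX ++ [(PySem.List.pyRange 0 pointSize 1).foldl
        (fun tempXPoint j => tempXPoint ++ [PySem.List.pyGetD list (i + j * stride) 0]) []])
    []

-- ===== PORT B =====
def groupXPLA_alt (list : List Int) (stride : Int) (pointSize : Int) : List (List Int) :=
  let returnedX0 : List (List Int) := (PySem.List.pyRange 0 stride 1).map (fun _ => [])
  (PySem.List.pyRange 0 ((returnedX0.length : Int) * pointSize) 1).foldl
    (fun returnedX k =>
      returnedX.modify (PySem.Int.mod k stride).toNat
        (fun bucket => bucket ++ [PySem.List.pyGetD list k 0]))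
    returnedX0

-- ===== PRECONDITION & SPEC =====
-- Pre_ excludes exactly the inputs on which A raises IndexError: 0 < stride, 0 < pointSize and
-- the list shorter than stride*pointSize.
def Pre_groupXPLA (list : List Int) (stride : Int) (pointSize : Int) : Prop :=
  0 < stride → 0 < pointSize → stride * pointSize ≤ (list.length : Int)
instance (list : List Int) (stride : Int) (pointSize : Int) : Decidable (Pre_groupXPLA list stride pointSize) := by unfold Pre_groupXPLA; infer_instance

def pvWitness_groupXPLA : List Int × Int × Int := ([1, 2, 3, 4, 5, 6], 2, 3)

def Spec_groupXPLA (list : List Int) (stride : Int) (pointSize : Int) (out : List (List Int)) : Prop := out = groupXPLA_alt list stride pointSize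
instance (list : List Int) (stride : Int) (pointSize : Int) (out : List (List Int)) : Decidable (Spec_groupXPLA list stride pointSize out) := by unfold Spec_groupXPLA; infer_instance

-- ===== CLAIM (what is proved, stated in full; the proofs are below) =====
def Claim_equal_groupXPLA : Prop := ∀ (list : List Int) (stride : Int) (pointSize : Int), Dom_groupXPLA list stride pointSize → Pre_groupXPLA list stride pointSize → Spec_groupXPLA list stride pointSize (groupXPLA list stride pointSize)

-- ===== LEMMAS AND PROOFS =====

-- Modifying buckets 0,…,n-1 in order of a list given as a map over range.
theorem foldl_modify_map_range {α : Type} (u : Nat → α → α) (G : Nat → α) (s : Nat) :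
    ∀ n, n ≤ s →
      (List.range n).foldl (fun st c => st.modify c (u c)) ((List.range s).map G)
        = (List.range s).map (fun c => if c < n then u c (G c) else G c) := by
  intro n
  induction n with
  | zero => intro _; simp
  | succ n ih =>
    intro hn
    rw [List.range_succ, List.foldl_append, ih (by omega)]
    simp only [List.foldl_cons, List.foldl_nil]
    apply List.ext_getElem
    · simp
    · intro j h1 h2
      have hj : j < s := by simpa using h2
      rw [List.getElem_modify]
      simp only [List.getElem_map, List.getElem_range]
      by_cases hje : n = j
      · subst hje
        simp
      · rw [if_neg hje]
        split_ifs with ha hb <;> first | rfl | omega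

-- Python's k % stride for k = stride*t + c, 0 ≤ c < stride.
theorem mod_block (stride : Int) (t : Nat) (c : Nat) (hs : 0 < stride) (hc : (c : Int) < stride) :
    PySem.Int.mod (stride * (t : Int) + (c : Int)) stride = (c : Int) := by
  rw [PySem.Int.mod_eq_emod_of_pos hs]
  rw [show stride * (t : Int) + (c : Int) = (c : Int) + stride * (t : Int) by ring,
    Int.add_mul_emod_self_left]
  exact Int.emod_eq_of_lt (by positivity) hc

-- Invariant of B's single flat pass: after t complete blocks of stride elements,
-- bucket c holds the first t strided picks of A's group c.
theorem alt_inv (list : List Int) (stride : Int) (hs : 0 < stride) (t : Nat) :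
    (PySem.List.pyRange 0 (stride * (t : Int)) 1).foldl
        (fun returnedX k =>
          returnedX.modify (PySem.Int.mod k stride).toNat
            (fun bucket => bucket ++ [PySem.List.pyGetD list k 0]))
        ((List.range stride.toNat).map (fun (_ : Nat) => ([] : List Int)))
      = (List.range stride.toNat).map
          (fun (c : Nat) => (List.range t).map
            (fun (j : Nat) => PySem.List.pyGetD list (((c : Int)) + ((j : Int)) * stride) 0)) := by
  induction t with
  | zero =>
    rw [show stride * ((0 : Nat) : Int) = 0 by simp,
      PySem.List.pyRange_one_eq_nil (le_refl 0)]
    simp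
  | succ t ih =>
    rw [show ((t + 1 : Nat) : Int) = (t : Int) + 1 by push_cast; ring]
    rw [PySem.List.pyRange_one_append 0 (stride * (t : Int)) (stride * ((t : Int) + 1))
        (by positivity) (by nlinarith)]
    rw [List.foldl_append, ih]
    have hblock : PySem.List.pyRange (stride * (t : Int)) (stride * ((t : Int) + 1)) 1
        = (List.range stride.toNat).map (fun (k : Nat) => stride * (t : Int) + (k : Int)) := by
      rw [PySem.List.pyRange_one,
        show stride * ((t : Int) + 1) - stride * (t : Int) = stride by ring]
    rw [hblock, List.foldl_map]
    have hcongr := PySem.List.foldl_congr_mem (List.range stride.toNat)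
      (fun (x : List (List Int)) (y : Nat) =>
        x.modify (PySem.Int.mod (stride * (t : Int) + (y : Int)) stride).toNat
          (fun bucket => bucket ++ [PySem.List.pyGetD list (stride * (t : Int) + (y : Int)) 0]))
      (fun (x : List (List Int)) (y : Nat) =>
        x.modify y
          (fun bucket => bucket ++ [PySem.List.pyGetD list (stride * (t : Int) + (y : Int)) 0]))
      ((List.range stride.toNat).map
          (fun (c : Nat) => (List.range t).map
            (fun (j : Nat) => PySem.List.pyGetD list (((c : Int)) + ((j : Int)) * stride) 0)))
      (by
        intro acc c hc
        have hcs : (c : Int) < stride := by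
          have := List.mem_range.mp hc; omega
        simp only [mod_block stride t c hs hcs, Int.toNat_natCast])
    rw [hcongr, foldl_modify_map_range _ _ _ _ (le_refl _)]
    apply List.map_congr_left
    intro c hc
    have hcn : c < stride.toNat := List.mem_range.mp hc
    rw [if_pos hcn, List.range_succ, List.map_append]
    simp only [List.map_cons, List.map_nil]
    congr 3
    ring

-- ===== VERDICT (by name: the statement is the Claim_ definition above) =====
theorem groupXPLA_spec : Claim_equal_groupXPLA := by
  intro list stride pointSize _ _
  unfold Spec_groupXPLA groupXPLA groupXPLA_alt
  rw [PySem.List.foldl_append_singleton_eq_map, List.nil_append]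
  by_cases hs : 0 < stride
  · have hRs : PySem.List.pyRange 0 stride 1
        = (List.range stride.toNat).map (fun (k : Nat) => ((k : Nat) : Int)) := by
      rw [PySem.List.pyRange_one]
      simp only [zero_add, sub_zero]
    have hlen : (((PySem.List.pyRange 0 stride 1).map
        (fun (_ : Int) => ([] : List Int))).length : Int) = stride := by
      rw [hRs]; simp; omega
    simp only [hlen]
    by_cases hp : 0 < pointSize
    · have hps : ((pointSize.toNat : Nat) : Int) = pointSize := by omega
      rw [hRs, List.map_map, List.map_map]
      simp only [Function.comp_def]
      rw [← hps, alt_inv list stride hs pointSize.toNat]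
      apply List.map_congr_left
      intro c _
      rw [PySem.List.foldl_append_singleton_eq_map, List.nil_append, PySem.List.pyRange_one]
      rw [List.map_map]
      simp only [Function.comp_def, zero_add, sub_zero, Int.toNat_natCast]
    · have h1 : PySem.List.pyRange 0 pointSize 1 = [] :=
        PySem.List.pyRange_one_eq_nil (by omega)
      have h2 : PySem.List.pyRange 0 (stride * pointSize) 1 = [] :=
        PySem.List.pyRange_one_eq_nil (by nlinarith)
      rw [h1, h2]
      simp
  · have h1 : PySem.List.pyRange 0 stride 1 = [] :=
      PySem.List.pyRange_one_eq_nil (by omega)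
    rw [h1]
    simp
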